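-- pv_equiv track=rewrite | github.com/KEEN-Research/NCBnounClassification | group 2/src/utility.py | get_unique_prefixes
-- ===== SOURCE A (Python) =====
-- def get_unique_prefixes(prefixDict):
--     uniquePrefix = []
--     for (value,prefix) in prefixDict:
--         isUnique = True
--         for value2, otherPrefix in prefixDict:
--
--             if(len(otherPrefix) >= len(prefix) and (value != value2)):
--                 if otherPrefix.startswith(prefix):
--                     isUnique = False
--                     break
--         if isUnique:
--             uniquePrefix.append((value,prefix))
--
--     return uniquePrefix
-- ===== SOURCE B (Python) =====
-- def get_unique_prefixes(prefixDict):
--     # One pass indexes every prefix-of-a-prefix in a dict summarising the values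
--     # seen below it (the value if all agree, None on conflict); then one filter pass.
--     rep = {}
--     for value, prefix in prefixDict:
--         for i in range(len(prefix) + 1):
--             q = prefix[:i]
--             if q not in rep:
--                 rep[q] = value
--             elif rep[q] != value:
--                 rep[q] = None
--     return [(value, prefix) for value, prefix in prefixDict if rep[prefix] == value]
-- ===== Notes on version B (the rewrite author's own statement) =====
-- stated objective: alternative
-- what changed: B replaces A's all-pairs scan (for each entry, rescan the whole list for a differently-valued extension) by a single pass that records, for every prefix of every entry's prefix, a one-slot summary of the values seen under it (the value while all agree, None on conflict) in a dict, followed by one filter pass querying that dict; this trades A's O(n^2*L) worst case for O(n*L^2), but on conflict-heavy inputs A's early break makes it comparably fast.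
import Mathlib
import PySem

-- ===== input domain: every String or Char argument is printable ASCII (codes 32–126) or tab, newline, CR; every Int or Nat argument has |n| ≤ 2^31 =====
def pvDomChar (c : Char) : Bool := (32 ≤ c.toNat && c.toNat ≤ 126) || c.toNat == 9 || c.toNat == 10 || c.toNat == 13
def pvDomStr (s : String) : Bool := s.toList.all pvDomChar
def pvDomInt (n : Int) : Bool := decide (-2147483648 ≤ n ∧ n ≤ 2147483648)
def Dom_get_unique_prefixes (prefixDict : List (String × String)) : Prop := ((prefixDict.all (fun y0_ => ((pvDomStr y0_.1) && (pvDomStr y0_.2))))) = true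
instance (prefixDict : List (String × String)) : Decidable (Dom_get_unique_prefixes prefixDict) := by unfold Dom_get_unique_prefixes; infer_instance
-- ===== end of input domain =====

-- B replaces A's all-pairs rescan by one pass that indexes every prefix of every entry's
-- prefix in a dict summarising the values seen under it, then one filter pass (alternative).

-- ===== PORT A =====
-- inner 'for value2, otherPrefix in prefixDict: … break' loop of A
def pvAInner (v p : String) : List (String × String) → Bool
  | [] => true
  | (v2, p2) :: rest =>
    if PySem.Str.len p2 ≥ PySem.Str.len p ∧ v ≠ v2 then
      if PySem.Str.startswith p2 p then false
      else pvAInner v p rest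
    else pvAInner v p rest

def get_unique_prefixes (prefixDict : List (String × String)) : List (String × String) :=
  prefixDict.foldl
    (fun acc vp => if pvAInner vp.1 vp.2 prefixDict then acc ++ [vp] else acc) []

-- ===== PORT B =====
-- body of B's inner loop: 'if q not in rep: rep[q] = value; elif rep[q] != value: rep[q] = None'
def pvBUpdate (rep : PySem.Dict String (Option String)) (q : String) (v : String) :
    PySem.Dict String (Option String) :=
  if rep.contains q = false then rep.insert q (some v)
  else if rep.getD q none ≠ some v then rep.insert q none
  else rep

-- 'for value, prefix in prefixDict: for i in range(len(prefix)+1): …'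
def pvBuildRep (prefixDict : List (String × String)) : PySem.Dict String (Option String) :=
  prefixDict.foldl
    (fun rep vp =>
      (PySem.List.pyRange 0 (PySem.Str.len vp.2 + 1) 1).foldl
        (fun rep i => pvBUpdate rep (PySem.Str.slice vp.2 none (some i)) vp.1) rep)
    PySem.Dict.empty

def get_unique_prefixes_alt (prefixDict : List (String × String)) : List (String × String) :=
  let rep := pvBuildRep prefixDict
  prefixDict.filter (fun vp => rep.getD vp.2 none == some vp.1)

-- ===== PRECONDITION & SPEC =====
def Spec_get_unique_prefixes (prefixDict : List (String × String)) (out : List (String × String)) : Prop := out = get_unique_prefixes_alt prefixDict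
instance (prefixDict : List (String × String)) (out : List (String × String)) : Decidable (Spec_get_unique_prefixes prefixDict out) := by unfold Spec_get_unique_prefixes; infer_instance

-- ===== CLAIM (what is proved, stated in full; the proofs are below) =====
def Claim_equal_get_unique_prefixes : Prop := ∀ (prefixDict : List (String × String)), Dom_get_unique_prefixes prefixDict → Spec_get_unique_prefixes prefixDict (get_unique_prefixes prefixDict)

-- ===== LEMMAS AND PROOFS =====

-- what pvBUpdate does to the stored summary at the touched key
def pvU (v : String) : Option (Option String) → Option (Option String)
  | none => some (some v)
  | some r => some (if r = some v then r else none)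

-- summary of a value list: none if empty, some (some v) if all equal v, some none on conflict
def pvCollapse : List String → Option (Option String)
  | [] => none
  | v :: vs => some (if vs.all (fun w => w = v) then some v else none)

-- the values of all entries whose prefix extends q
def pvExt (l : List (String × String)) (q : String) : List String :=
  (l.filter (fun x => PySem.Str.startswith x.2 q)).map Prod.fst

theorem pvStartswith_len_le {p2 p : String} (h : PySem.Str.startswith p2 p = true) :
    PySem.Str.len p ≤ PySem.Str.len p2 := by
  rw [PySem.Str.startswith_eq, PySem.Chars.startswith_iff] at h
  simp only [PySem.Str.len_eq]
  exact_mod_cast h.length_le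

theorem pvStartswith_refl (p : String) : PySem.Str.startswith p p = true := by
  rw [PySem.Str.startswith_eq, PySem.Chars.startswith_iff]

theorem pvAInner_eq_true_iff (v p : String) (l : List (String × String)) :
    pvAInner v p l = true ↔ ∀ y ∈ l, PySem.Str.startswith y.2 p = true → y.1 = v := by
  induction l with
  | nil => simp [pvAInner]
  | cons x rest ih =>
    obtain ⟨v2, p2⟩ := x
    simp only [pvAInner]
    split_ifs with h1 h2
    · simp only [false_iff]
      intro hall
      exact h1.2 ((hall (v2, p2) (by simp) h2).symm)
    · rw [ih]
      constructor
      · intro hall y hy hsw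
        rcases List.mem_cons.mp hy with rfl | hy'
        · exact absurd hsw h2
        · exact hall y hy' hsw
      · exact fun hall y hy hsw => hall y (List.mem_cons_of_mem _ hy) hsw
    · rw [ih]
      constructor
      · intro hall y hy hsw
        rcases List.mem_cons.mp hy with rfl | hy'
        · by_contra hne
          exact h1 ⟨pvStartswith_len_le hsw, fun he => hne he.symm⟩
        · exact hall y hy' hsw
      · exact fun hall y hy hsw => hall y (List.mem_cons_of_mem _ hy) hsw

theorem pvBUpdate_get? (d : PySem.Dict String (Option String)) (q v : String) (q' : String) :
    (pvBUpdate d q v).get? q' = if q' = q then pvU v (d.get? q) else d.get? q' := by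
  unfold pvBUpdate
  rw [PySem.Dict.contains_eq_isSome_get?, PySem.Dict.getD_eq_get?_getD]
  by_cases hq : q' = q
  · cases h : d.get? q with
    | none => simp [hq, pvU, PySem.Dict.get?_insert_self]
    | some r =>
      by_cases hr : r = some v
      · simp [h, hq, hr, pvU]
      · simp [hq, hr, pvU, PySem.Dict.get?_insert_self]
  · cases h : d.get? q with
    | none => simp [hq, PySem.Dict.get?_insert]
    | some r =>
      by_cases hr : r = some v
      · simp [hq, hr]
      · simp [hq, hr, PySem.Dict.get?_insert]

theorem pvFoldGet (v : String) (f : Int → String) (is : List Int)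
    (d : PySem.Dict String (Option String)) (q : String) (hnd : (is.map f).Nodup) :
    (is.foldl (fun rep i => pvBUpdate rep (f i) v) d).get? q
      = if q ∈ is.map f then pvU v (d.get? q) else d.get? q := by
  induction is generalizing d with
  | nil => simp
  | cons i is ih =>
    simp only [List.map_cons, List.nodup_cons] at hnd
    rw [List.foldl_cons, ih _ hnd.2]
    by_cases hq : q = f i
    · subst hq
      rw [pvBUpdate_get? d (f i) v (f i)]
      simp [hnd.1]
    · rw [pvBUpdate_get? d (f i) v q, if_neg hq]
      by_cases hm : q ∈ List.map f is <;> simp [hq, hm]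

theorem pvMem_prefixSlices (p q : String) :
    q ∈ (PySem.List.pyRange 0 (PySem.Str.len p + 1) 1).map
          (fun i => PySem.Str.slice p none (some i))
      ↔ PySem.Str.startswith p q = true := by
  rw [PySem.Str.startswith_eq, PySem.Chars.startswith_iff]
  simp only [List.mem_map, PySem.List.mem_pyRange_one, PySem.Str.len_eq]
  constructor
  · rintro ⟨i, ⟨h0, hi⟩, rfl⟩
    rw [PySem.Str.toList_slice, PySem.Chars.slice_eq_listSlice, PySem.List.slice_to _ h0]
    exact List.take_prefix _ _
  · intro hpre
    refine ⟨(q.toList.length : Int), ⟨by positivity, ?_⟩, ?_⟩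
    · have := hpre.length_le; omega
    · rw [← String.toList_inj]
      rw [PySem.Str.toList_slice, PySem.Chars.slice_eq_listSlice,
        PySem.List.slice_to _ (by positivity)]
      simp only [Int.toNat_natCast]
      exact (List.prefix_iff_eq_take.mp hpre).symm

theorem pvSlices_nodup (p : String) :
    ((PySem.List.pyRange 0 (PySem.Str.len p + 1) 1).map
        (fun i => PySem.Str.slice p none (some i))).Nodup := by
  refine List.Nodup.map_on ?_ (PySem.List.nodup_pyRange_one _ _)
  intro i hi j hj hf
  rw [PySem.List.mem_pyRange_one] at hi hj
  rw [PySem.Str.len_eq] at hi hj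
  rw [← String.toList_inj, PySem.Str.toList_slice, PySem.Str.toList_slice,
    PySem.Chars.slice_eq_listSlice, PySem.Chars.slice_eq_listSlice,
    PySem.List.slice_to _ hi.1, PySem.List.slice_to _ hj.1] at hf
  have := congrArg List.length hf
  simp only [List.length_take] at this
  omega

theorem pvCollapse_append (vs : List String) (w : String) :
    pvCollapse (vs ++ [w]) = pvU w (pvCollapse vs) := by
  cases vs with
  | nil => simp [pvCollapse, pvU]
  | cons v rest =>
    simp only [List.cons_append, pvCollapse, pvU, List.all_append, List.all_cons, List.all_nil,
      Bool.and_true]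
    cases hall : rest.all (fun w => decide (w = v)) with
    | true =>
      by_cases hwv : w = v
      · simp [hwv]
      · simp [hwv, Ne.symm hwv]
    | false => simp

theorem pvExt_append (l : List (String × String)) (x : String × String) (q : String) :
    pvExt (l ++ [x]) q
      = pvExt l q ++ (if PySem.Str.startswith x.2 q then [x.1] else []) := by
  unfold pvExt
  rw [List.filter_append, List.map_append]
  congr 1
  cases h : PySem.Str.startswith x.2 q with
  | false =>
    simp only [List.filter_cons, List.filter_nil, h, Bool.false_eq_true, if_false, List.map_nil]
  | true =>
    simp only [List.filter_cons, List.filter_nil, h, if_true, List.map_cons, List.map_nil]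

theorem pvBuildRep_get? (l : List (String × String)) (q : String) :
    (pvBuildRep l).get? q = pvCollapse (pvExt l q) := by
  induction l using List.reverseRecOn with
  | nil => simp [pvBuildRep, pvExt, pvCollapse]
  | append_singleton l x ih =>
    unfold pvBuildRep at *
    rw [List.foldl_append, List.foldl_cons, List.foldl_nil,
      pvFoldGet _ _ _ _ _ (pvSlices_nodup x.2), pvExt_append]
    by_cases h : PySem.Str.startswith x.2 q = true
    · rw [if_pos ((pvMem_prefixSlices x.2 q).mpr h), ih, if_pos h, pvCollapse_append]
    · rw [if_neg (fun hm => h ((pvMem_prefixSlices x.2 q).mp hm)), ih, if_neg h,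
        List.append_nil]

theorem pvCollapse_getD_iff (ws : List String) (a : String) (h : ws ≠ []) :
    (((pvCollapse ws).getD none) == some a) = true ↔ ∀ w ∈ ws, w = a := by
  cases ws with
  | nil => exact absurd rfl h
  | cons v rest =>
    simp only [pvCollapse, Option.getD_some, List.forall_mem_cons]
    by_cases hall : ∀ w ∈ rest, w = v
    · rw [if_pos (by simpa [List.all_eq_true] using hall)]
      simp only [beq_iff_eq, Option.some.injEq]
      constructor
      · rintro rfl; exact ⟨rfl, hall⟩
      · rintro ⟨rfl, _⟩; rfl
    · rw [if_neg (by simpa [List.all_eq_true] using hall)]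
      simp only [beq_iff_eq, reduceCtorEq, false_iff, not_and]
      rintro rfl hra
      exact hall (fun w hw => hra w hw)

theorem pvPred_eq (l : List (String × String)) (x : String × String) (hx : x ∈ l) :
    ((pvBuildRep l).getD x.2 none == some x.1) = pvAInner x.1 x.2 l := by
  rw [Bool.eq_iff_iff, pvAInner_eq_true_iff,
    PySem.Dict.getD_eq_get?_getD, pvBuildRep_get?]
  have hne : pvExt l x.2 ≠ [] := by
    have : x.1 ∈ pvExt l x.2 := by
      unfold pvExt
      exact List.mem_map_of_mem (List.mem_filter.mpr ⟨hx, pvStartswith_refl x.2⟩)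
    exact fun h => by simp [h] at this
  rw [pvCollapse_getD_iff _ _ hne]
  unfold pvExt
  constructor
  · intro hall y hy hsw
    exact hall y.1 (List.mem_map_of_mem (List.mem_filter.mpr ⟨hy, hsw⟩))
  · intro hall w hw
    simp only [List.mem_map, List.mem_filter] at hw
    obtain ⟨y, ⟨hy, hsw⟩, rfl⟩ := hw
    exact hall y hy hsw

-- ===== VERDICT (by name: the statement is the Claim_ definition above) =====
theorem get_unique_prefixes_spec : Claim_equal_get_unique_prefixes := by
  intro l _
  unfold Spec_get_unique_prefixes get_unique_prefixes get_unique_prefixes_alt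
  rw [PySem.List.foldl_append_if_eq_filter (fun vp => pvAInner vp.1 vp.2 l) l [],
    List.nil_append]
  exact List.filter_congr (fun x hx => (pvPred_eq l x hx).symm)
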